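-- pv_equiv track=rewrite | github.com/AdamZhouSE/pythonHomework | Code/CodeRecords/2148/60757/319805.py | calb
-- ===== SOURCE A (Python) =====
-- def calb(s):
--     n=len(s)
--     if n==1:
--         li=[]
--         if s=='+':
--             li.append('0')
--             return li
--         elif s=='-':
--             li.append('1')
--             return li
--         else:
--             li.append('0')
--             li.append('1')
--             return li
--     else:
--         a=s[0]
--         li=calb(s[1:])
--         t=len(li)
--         if a=='+':
--             for i in range(t):
--                 li[i]='0'+li[i]
--             return li
--         elif a=='-':
--             for i in range(t):
--                 li[i]='1'+li[i]
--             return li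
--         else:
--             for i in range(t):
--                 li.append(li[i])
--             for i in range(t):
--                 li[i]='0'+li[i]
--             for i in range(t,2*t):
--                 li[i]='1'+li[i]
--             return li
-- ===== SOURCE B (Python) =====
-- def calb(s):
--     res = ['']
--     for c in s:
--         ds = ['0'] if c == '+' else ['1'] if c == '-' else ['0', '1']
--         res = [r + d for r in res for d in ds]
--     return res
-- ===== Notes on version B (the rewrite author's own statement) =====
-- stated objective: simpler
-- what changed: Replaced the suffix recursion with prepend-loops by a single left-to-right iterative product build (res = [r+d for r in res for d in choices(c)]).
import Mathlib
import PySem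

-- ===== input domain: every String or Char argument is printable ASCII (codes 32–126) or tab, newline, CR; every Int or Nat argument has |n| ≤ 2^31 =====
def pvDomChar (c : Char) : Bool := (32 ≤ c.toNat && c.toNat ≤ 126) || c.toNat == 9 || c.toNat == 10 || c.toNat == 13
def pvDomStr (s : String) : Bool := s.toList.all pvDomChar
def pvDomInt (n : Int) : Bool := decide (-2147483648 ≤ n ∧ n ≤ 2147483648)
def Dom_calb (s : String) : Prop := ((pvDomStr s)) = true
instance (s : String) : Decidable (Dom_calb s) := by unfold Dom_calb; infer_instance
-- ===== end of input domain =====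

-- B replaces A's suffix recursion by an iterative left-to-right product build; same cost, simpler.
-- Equivalence is about the return value; A raises IndexError on the empty string (excluded by Pre_).

-- ===== PORT A =====
-- A recurses on the tail of the string; ported as structural recursion on the char list.
-- The in-place prefix loops become List.map; the wildcard's append-then-prefix loops become map ++ map.
def calbAux : List Char → List String
  | [] => []          -- unreachable: A raises IndexError on "" (excluded by Pre_calb)
  | [c] =>
    if c = '+' then ["0"]
    else if c = '-' then ["1"]
    else ["0", "1"]
  | c :: d :: rest =>
    let li := calbAux (d :: rest)
    if c = '+' then li.map (fun x => "0" ++ x)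
    else if c = '-' then li.map (fun x => "1" ++ x)
    else li.map (fun x => "0" ++ x) ++ li.map (fun x => "1" ++ x)

def calb (s : String) : List String := calbAux s.toList

-- ===== PORT B =====
def calbStep (res : List String) (c : Char) : List String :=
  let ds := if c = '+' then ["0"] else if c = '-' then ["1"] else ["0", "1"]
  res.flatMap (fun r => ds.map (fun d => r ++ d))

def calb_alt (s : String) : List String := s.toList.foldl calbStep [""]

-- ===== PRECONDITION & SPEC =====
-- A raises IndexError on the empty string (s[0] in the recursive branch), so Pre_ excludes exactly it.
def Pre_calb (s : String) : Prop := s ≠ ""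
instance (s : String) : Decidable (Pre_calb s) := by unfold Pre_calb; infer_instance
def pvWitness_calb : String := "?+"

def Spec_calb (s : String) (out : List String) : Prop := out = calb_alt s
instance (s : String) (out : List String) : Decidable (Spec_calb s out) := by unfold Spec_calb; infer_instance

-- ===== CLAIM (what is proved, stated in full; the proofs are below) =====
def Claim_equal_calb : Prop := ∀ (s : String), Dom_calb s → Pre_calb s → Spec_calb s (calb s)

-- ===== LEMMAS AND PROOFS =====
def pvDs (c : Char) : List String :=
  if c = '+' then ["0"] else if c = '-' then ["1"] else ["0", "1"]

lemma calbStep_eq (res : List String) (c : Char) :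
    calbStep res c = res.flatMap (fun r => (pvDs c).map (fun d => r ++ d)) := rfl

lemma foldl_calbStep (l : List Char) (A : List String) :
    l.foldl calbStep A = A.flatMap (fun r => (l.foldl calbStep [""]).map (fun p => r ++ p)) := by
  induction l generalizing A with
  | nil =>
    simp [String.append_empty]
  | cons c l ih =>
    simp only [List.foldl_cons]
    rw [ih (calbStep A c), ih (calbStep [""] c)]
    simp only [calbStep_eq]
    simp [List.flatMap_assoc, List.flatMap_map, List.map_flatMap, List.map_map, Function.comp_def,
      String.empty_append, String.append_assoc]

lemma pvDs_flatMap (c : Char) (li : List String) :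
    (pvDs c).flatMap (fun d => li.map (fun x => d ++ x)) =
      (if c = '+' then li.map (fun x => "0" ++ x)
       else if c = '-' then li.map (fun x => "1" ++ x)
       else li.map (fun x => "0" ++ x) ++ li.map (fun x => "1" ++ x)) := by
  unfold pvDs
  split_ifs <;> simp [List.flatMap]

lemma calbAux_eq_foldl : ∀ (l : List Char), l ≠ [] → calbAux l = l.foldl calbStep [""]
  | [], h => absurd rfl h
  | [c], _ => by
    simp only [List.foldl_cons, List.foldl_nil, calbStep_eq]
    simp only [calbAux]
    simp [pvDs, String.empty_append]
  | c :: d :: rest, _ => by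
    have ih := calbAux_eq_foldl (d :: rest) (by simp)
    have hP : List.foldl calbStep [""] (c :: d :: rest) =
        (calbStep [""] c).flatMap (fun r => (calbAux (d :: rest)).map (fun p => r ++ p)) := by
      rw [List.foldl_cons, foldl_calbStep (d :: rest), ← ih]
    rw [hP]
    simp only [calbAux]
    rw [calbStep_eq]
    simp only [List.flatMap_singleton, List.flatMap_map]
    rw [← pvDs_flatMap c (calbAux (d :: rest))]
    simp [String.empty_append]

-- ===== VERDICT (by name: the statement is the Claim_ definition above) =====
theorem calb_spec : Claim_equal_calb := by
  intro s _ hpre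
  unfold Spec_calb calb calb_alt
  apply calbAux_eq_foldl
  intro h
  exact hpre (by cases s; simp_all)
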